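-- pv_equiv track=rewrite | github.com/saiganesh08/AI | backward_chaining.py | check
-- ===== SOURCE A (Python) =====
-- def check(str,factDb):
--     facts=[]
--     flag=True
--     while flag==True:
--         flag=False
--         for txt in str:
--             for A1 in factDb:
--                 if A1[1]==txt:
--                     tmp=[A1[0],txt]
--                     if not tmp in facts:
--                         facts+=[tmp]
--                         str+=[A1[0]]
--                         flag=True
--     return facts
-- ===== SOURCE B (Python) =====
-- def check(str, factDb):
--     # Index the rule base once by conclusion, then do a single worklist sweep
--     # with a set for O(1) duplicate-fact detection.  Like the original, new
--     # premises are appended to the caller's `str` list (same mutation).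
--     index = {}
--     for a in factDb:
--         index[a[1]] = index.get(a[1], []) + [a[0]]
--     seen = set()
--     facts = []
--     for txt in str:                      # `str` grows while we iterate
--         for p in index.get(txt, []):
--             if (p, txt) not in seen:
--                 seen.add((p, txt))
--                 facts.append([p, txt])
--                 str.append(p)
--     return facts
-- ===== Notes on version B (the rewrite author's own statement) =====
-- stated objective: faster
-- what changed: B builds a one-time dict index of factDb keyed by conclusion and does a single growing-worklist sweep with a set of seen (premise, conclusion) tuples, instead of A's repeated whole-list passes that rescan all of factDb for every txt and test membership by a linear scan of facts.
-- outside the precondition, e.g. on check([], [['x']]): A returns [], B raises IndexError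
import Mathlib
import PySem

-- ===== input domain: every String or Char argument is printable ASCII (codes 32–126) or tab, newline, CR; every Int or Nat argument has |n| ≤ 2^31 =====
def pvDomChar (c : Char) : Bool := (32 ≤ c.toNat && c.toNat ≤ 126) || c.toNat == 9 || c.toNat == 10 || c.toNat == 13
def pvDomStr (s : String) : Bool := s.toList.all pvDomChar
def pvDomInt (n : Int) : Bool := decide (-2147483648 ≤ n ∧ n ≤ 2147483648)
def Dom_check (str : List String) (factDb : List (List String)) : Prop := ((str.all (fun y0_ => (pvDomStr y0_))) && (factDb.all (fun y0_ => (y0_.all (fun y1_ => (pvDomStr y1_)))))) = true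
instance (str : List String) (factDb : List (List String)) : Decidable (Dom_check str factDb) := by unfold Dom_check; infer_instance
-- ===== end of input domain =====

-- B indexes factDb by conclusion once and does a single worklist sweep with a set for
-- duplicate-fact detection, instead of A's repeated whole-database rescans with a linear
-- 'in facts' test.  Both A and B append the derived premises to the caller's `str` list
-- (same observable mutation); the theorems below are about the return value.

-- ===== PORT A =====
-- a[0] / a[1] (exact under Pre_check, which guarantees the index is in range)
def pvFld0 (a : List String) : String := PySem.List.pyGetD a 0 ""
def pvFld1 (a : List String) : String := PySem.List.pyGetD a 1 ""

-- the body of `for A1 in factDb: ...` for one txt; state = (facts, newly appended strs, flag)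
def checkTxt (factDb : List (List String)) (txt : String)
    (st : List (List String) × List String × Bool) : List (List String) × List String × Bool :=
  factDb.foldl (fun st a =>
    if pvFld1 a == txt then
      let tmp := [pvFld0 a, txt]
      if tmp ∈ st.1 then st
      else (st.1 ++ [tmp], st.2.1 ++ [pvFld0 a], true)
    else st) st

-- `for txt in str` over the growing list: s = current full str, pending = unprocessed suffix.
-- fuel only makes the recursion total; it is proved sufficient below.
def checkPass (factDb : List (List String)) :
    Nat → List (List String) → List String → List String → Bool →
    List (List String) × List String × Bool
  | 0, facts, s, _, flag => (facts, s, flag)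
  | fuel+1, facts, s, pending, flag =>
    match pending with
    | [] => (facts, s, flag)
    | txt :: rest =>
      let r := checkTxt factDb txt (facts, [], flag)
      checkPass factDb fuel r.1 (s ++ r.2.1) (rest ++ r.2.1) r.2.2

-- `while flag == True:` (fuel makes it total; proved sufficient below)
def checkWhile (factDb : List (List String)) :
    Nat → List (List String) → List String → List (List String)
  | 0, facts, _ => facts
  | fuel+1, facts, s =>
    let r := checkPass factDb (s.length + factDb.length + 1) facts s s false
    if r.2.2 then checkWhile factDb fuel r.1 r.2.1 else r.1

def check (str : List String) (factDb : List (List String)) : List (List String) :=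
  checkWhile factDb (factDb.length + 2) [] str

-- ===== PORT B =====
-- index[a[1]] = index.get(a[1], []) + [a[0]]
def buildIndex (factDb : List (List String)) : PySem.Dict String (List String) :=
  factDb.foldl (fun d a => d.insert (pvFld1 a) (d.getD (pvFld1 a) [] ++ [pvFld0 a]))
    PySem.Dict.empty

-- the body of `for p in index.get(txt, []): ...`; state = (seen, facts, newly appended strs)
def altTxt (idx : PySem.Dict String (List String)) (txt : String)
    (st : PySem.Set (String × String) × List (List String) × List String) :
    PySem.Set (String × String) × List (List String) × List String :=
  (idx.getD txt []).foldl (fun st p =>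
    if st.1.contains (p, txt) then st
    else (st.1.add (p, txt), st.2.1 ++ [[p, txt]], st.2.2 ++ [p])) st

-- `for txt in str` over the growing worklist (fuel = totality device, proved sufficient)
def altLoop (idx : PySem.Dict String (List String)) :
    Nat → PySem.Set (String × String) → List (List String) → List String →
    List (List String)
  | 0, _, facts, _ => facts
  | fuel+1, seen, facts, pending =>
    match pending with
    | [] => facts
    | txt :: rest =>
      let r := altTxt idx txt (seen, facts, [])
      altLoop idx fuel r.1 r.2.1 (rest ++ r.2.2)

def check_alt (str : List String) (factDb : List (List String)) : List (List String) :=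
  altLoop (buildIndex factDb) (str.length + factDb.length + 1) PySem.Set.empty [] str

-- ===== PRECONDITION & SPEC =====
-- Pre_ excludes factDb containing a rule with fewer than two fields: Python A raises
-- IndexError on A1[1] whenever str is nonempty, and B's index construction raises on
-- such a rule even when str is empty (so A's [] on ([], [[...short...]]) is excluded).
def Pre_check (str : List String) (factDb : List (List String)) : Prop :=
  ∀ a ∈ factDb, 2 ≤ a.length
instance (str : List String) (factDb : List (List String)) : Decidable (Pre_check str factDb) := by
  unfold Pre_check; infer_instance
def pvWitness_check : List String × List (List String) := (["a"], [["b", "a"], ["c", "b"]])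

def Spec_check (str : List String) (factDb : List (List String)) (out : List (List String)) : Prop := out = check_alt str factDb
instance (str : List String) (factDb : List (List String)) (out : List (List String)) : Decidable (Spec_check str factDb out) := by unfold Spec_check; infer_instance

-- ===== CLAIM (what is proved, stated in full; the proofs are below) =====
def Claim_equal_check : Prop := ∀ (str : List String) (factDb : List (List String)), Dom_check str factDb → Pre_check str factDb → Spec_check str factDb (check str factDb)

-- ===== LEMMAS AND PROOFS =====

-- the pair [a[0], a[1]] a rule can ever contribute
def dbPair (a : List String) : List String := [pvFld0 a, pvFld1 a]

-- seen (B's set of tuples) mirrors facts (A's list of 2-element lists)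
def RelSF (seen : PySem.Set (String × String)) (facts : List (List String)) : Prop :=
  ∀ p t : String, (p, t) ∈ seen ↔ [p, t] ∈ facts

-- txt is saturated: every matching rule's fact is already present
def SatTxt (factDb : List (List String)) (facts : List (List String)) (txt : String) : Prop :=
  ∀ a ∈ factDb, pvFld1 a = txt → [pvFld0 a, txt] ∈ facts

theorem checkTxt_shape (factDb : List (List String)) (txt : String) :
    ∀ (facts : List (List String)) (apps : List String) (flag : Bool),
    ∃ X : List String, checkTxt factDb txt (facts, apps, flag) =
      (facts ++ X.map (fun p => [p, txt]), apps ++ X, flag || !X.isEmpty) := by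
  induction factDb with
  | nil => intro facts apps flag; exact ⟨[], by simp [checkTxt]⟩
  | cons a db ih =>
    intro facts apps flag
    by_cases h1 : pvFld1 a = txt
    · by_cases h2 : [pvFld0 a, txt] ∈ facts
      · obtain ⟨X, hX⟩ := ih facts apps flag
        exact ⟨X, by simpa [checkTxt, h1, h2] using hX⟩
      · obtain ⟨X, hX⟩ := ih (facts ++ [[pvFld0 a, txt]]) (apps ++ [pvFld0 a]) true
        exact ⟨pvFld0 a :: X, by simpa [checkTxt, h1, h2, List.append_assoc] using hX⟩
    · obtain ⟨X, hX⟩ := ih facts apps flag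
      exact ⟨X, by simpa [checkTxt, h1] using hX⟩

theorem checkTxt_cons (a : List String) (db : List (List String)) (txt : String)
    (st : List (List String) × List String × Bool) :
    checkTxt (a :: db) txt st = checkTxt db txt
      (if pvFld1 a == txt then
        (if [pvFld0 a, txt] ∈ st.1 then st
         else (st.1 ++ [[pvFld0 a, txt]], st.2.1 ++ [pvFld0 a], true))
       else st) := rfl

theorem checkTxt_inv (factDb : List (List String)) (txt : String) :
    ∀ (facts : List (List String)) (apps : List String) (flag : Bool), facts.Nodup →
    (checkTxt factDb txt (facts, apps, flag)).1.Nodup ∧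
    (∀ x ∈ (checkTxt factDb txt (facts, apps, flag)).1,
      x ∈ facts ∨ ∃ a ∈ factDb, x = dbPair a) := by
  induction factDb with
  | nil => intro facts apps flag hnd; exact ⟨hnd, fun x hx => Or.inl hx⟩
  | cons a db ih =>
    intro facts apps flag hnd
    rw [checkTxt_cons]
    by_cases h1 : pvFld1 a = txt
    · by_cases h2 : [pvFld0 a, txt] ∈ facts
      · simp only [h1, beq_self_eq_true, if_true, h2, if_pos]
        obtain ⟨hn, hm⟩ := ih facts apps flag hnd
        refine ⟨hn, fun x hx => ?_⟩
        rcases hm x hx with h | ⟨b, hb, he⟩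
        · exact Or.inl h
        · exact Or.inr ⟨b, List.mem_cons_of_mem _ hb, he⟩
      · simp only [h1, beq_self_eq_true, if_true, h2, if_neg, not_false_iff]
        obtain ⟨hn, hm⟩ := ih (facts ++ [[pvFld0 a, txt]]) (apps ++ [pvFld0 a]) true
          (by simp [List.nodup_append, hnd]; exact fun y hy hcon => h2 (hcon ▸ hy))
        refine ⟨hn, fun x hx => ?_⟩
        rcases hm x hx with h | ⟨b, hb, he⟩
        · rcases List.mem_append.1 h with h' | h'
          · exact Or.inl h'
          · refine Or.inr ⟨a, List.mem_cons_self, ?_⟩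
            simp only [List.mem_singleton] at h'
            simp [h', dbPair, h1]
        · exact Or.inr ⟨b, List.mem_cons_of_mem _ hb, he⟩
    · simp only [beq_iff_eq, h1, if_neg, not_false_iff]
      obtain ⟨hn, hm⟩ := ih facts apps flag hnd
      refine ⟨hn, fun x hx => ?_⟩
      rcases hm x hx with h | ⟨b, hb, he⟩
      · exact Or.inl h
      · exact Or.inr ⟨b, List.mem_cons_of_mem _ hb, he⟩

theorem checkTxt_sat (factDb : List (List String)) (txt : String) :
    ∀ (facts : List (List String)) (apps : List String) (flag : Bool),
    SatTxt factDb (checkTxt factDb txt (facts, apps, flag)).1 txt ∧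
    (∀ x ∈ facts, x ∈ (checkTxt factDb txt (facts, apps, flag)).1) := by
  induction factDb with
  | nil =>
    intro facts apps flag
    exact ⟨fun a ha => absurd ha (List.not_mem_nil), fun x hx => hx⟩
  | cons a db ih =>
    intro facts apps flag
    rw [checkTxt_cons]
    by_cases h1 : pvFld1 a = txt
    · by_cases h2 : [pvFld0 a, txt] ∈ facts
      · simp only [h1, beq_self_eq_true, if_true, h2, if_pos]
        obtain ⟨hs, hm⟩ := ih facts apps flag
        refine ⟨fun b hb hbt => ?_, hm⟩
        rcases List.mem_cons.1 hb with rfl | hb'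
        · exact hm _ h2
        · exact hs b hb' hbt
      · simp only [h1, beq_self_eq_true, if_true, h2, if_neg, not_false_iff]
        obtain ⟨hs, hm⟩ := ih (facts ++ [[pvFld0 a, txt]]) (apps ++ [pvFld0 a]) true
        refine ⟨fun b hb hbt => ?_, fun x hx => hm _ (List.mem_append_left _ hx)⟩
        rcases List.mem_cons.1 hb with rfl | hb'
        · exact hm _ (List.mem_append_right _ (List.mem_singleton.2 rfl))
        · exact hs b hb' hbt
    · simp only [beq_iff_eq, h1, if_neg, not_false_iff]
      obtain ⟨hs, hm⟩ := ih facts apps flag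
      refine ⟨fun b hb hbt => ?_, hm⟩
      rcases List.mem_cons.1 hb with rfl | hb'
      · exact absurd hbt h1
      · exact hs b hb' hbt

theorem checkTxt_noop (factDb : List (List String)) (txt : String) :
    ∀ (facts : List (List String)) (apps : List String) (flag : Bool),
    SatTxt factDb facts txt →
    checkTxt factDb txt (facts, apps, flag) = (facts, apps, flag) := by
  induction factDb with
  | nil => intro facts apps flag _; rfl
  | cons a db ih =>
    intro facts apps flag hsat
    rw [checkTxt_cons]
    by_cases h1 : pvFld1 a = txt
    · have h2 : [pvFld0 a, txt] ∈ facts := hsat a List.mem_cons_self h1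
      simp only [h1, beq_self_eq_true, if_true, h2, if_pos]
      exact ih facts apps flag (fun b hb => hsat b (List.mem_cons_of_mem _ hb))
    · simp only [beq_iff_eq, h1, if_neg, not_false_iff]
      exact ih facts apps flag (fun b hb => hsat b (List.mem_cons_of_mem _ hb))

theorem buildIndex_getD_gen (t : String) :
    ∀ (db : List (List String)) (d : PySem.Dict String (List String)),
    (db.foldl (fun d a => d.insert (pvFld1 a) (d.getD (pvFld1 a) [] ++ [pvFld0 a])) d).getD t [] =
      d.getD t [] ++ (db.filter (fun a => pvFld1 a == t)).map pvFld0 := by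
  intro db
  induction db with
  | nil => intro d; simp
  | cons a db ih =>
    intro d
    simp only [List.foldl_cons, ih, List.filter_cons]
    by_cases h : pvFld1 a = t
    · simp [h, PySem.Dict.getD_insert]
    · simp [h, PySem.Dict.getD_insert, Ne.symm h]

theorem buildIndex_getD (factDb : List (List String)) (t : String) :
    (buildIndex factDb).getD t [] =
      (factDb.filter (fun a => pvFld1 a == t)).map pvFld0 := by
  simpa using buildIndex_getD_gen t factDb PySem.Dict.empty

theorem relSF_add (seen : PySem.Set (String × String)) (facts : List (List String))
    (p t : String) (hrel : RelSF seen facts) (hnm : [p, t] ∉ facts) :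
    RelSF (seen.add (p, t)) (facts ++ [[p, t]]) := by
  intro q u
  rw [PySem.Set.mem_add]
  simp only [List.mem_append, List.mem_singleton]
  constructor
  · rintro (h | h)
    · exact Or.inl ((hrel q u).1 h)
    · rcases Prod.mk.injEq .. ▸ h with ⟨rfl, rfl⟩; exact Or.inr rfl
  · rintro (h | h)
    · exact Or.inl ((hrel q u).2 h)
    · simp only [List.cons.injEq, and_true] at h
      obtain ⟨rfl, rfl, _⟩ := h
      exact Or.inr rfl

theorem altTxt_corr (factDb : List (List String)) (txt : String) :
    ∀ (facts : List (List String)) (seen : PySem.Set (String × String))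
      (apps : List String) (flag : Bool), RelSF seen facts →
    (altTxt (buildIndex factDb) txt (seen, facts, apps)).2.1 =
      (checkTxt factDb txt (facts, apps, flag)).1 ∧
    (altTxt (buildIndex factDb) txt (seen, facts, apps)).2.2 =
      (checkTxt factDb txt (facts, apps, flag)).2.1 ∧
    RelSF (altTxt (buildIndex factDb) txt (seen, facts, apps)).1
      (altTxt (buildIndex factDb) txt (seen, facts, apps)).2.1 := by
  have key : ∀ (db : List (List String)) (facts : List (List String))
      (seen : PySem.Set (String × String)) (apps : List String) (flag : Bool),
      RelSF seen facts →
      (((db.filter (fun a => pvFld1 a == txt)).map pvFld0).foldl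
          (fun st p => if st.1.contains (p, txt) then st
            else (st.1.add (p, txt), st.2.1 ++ [[p, txt]], st.2.2 ++ [p]))
          (seen, facts, apps)).2.1 = (checkTxt db txt (facts, apps, flag)).1 ∧
      (((db.filter (fun a => pvFld1 a == txt)).map pvFld0).foldl
          (fun st p => if st.1.contains (p, txt) then st
            else (st.1.add (p, txt), st.2.1 ++ [[p, txt]], st.2.2 ++ [p]))
          (seen, facts, apps)).2.2 = (checkTxt db txt (facts, apps, flag)).2.1 ∧
      RelSF (((db.filter (fun a => pvFld1 a == txt)).map pvFld0).foldl
          (fun st p => if st.1.contains (p, txt) then st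
            else (st.1.add (p, txt), st.2.1 ++ [[p, txt]], st.2.2 ++ [p]))
          (seen, facts, apps)).1
        (((db.filter (fun a => pvFld1 a == txt)).map pvFld0).foldl
          (fun st p => if st.1.contains (p, txt) then st
            else (st.1.add (p, txt), st.2.1 ++ [[p, txt]], st.2.2 ++ [p]))
          (seen, facts, apps)).2.1 := by
    intro db
    induction db with
    | nil => intro facts seen apps flag hrel; exact ⟨rfl, rfl, hrel⟩
    | cons a db ih =>
      intro facts seen apps flag hrel
      rw [checkTxt_cons, List.filter_cons]
      by_cases h1 : pvFld1 a = txt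
      · simp only [h1, beq_self_eq_true, if_true, List.map_cons, List.foldl_cons, if_pos]
        by_cases h2 : [pvFld0 a, txt] ∈ facts
        · have hc : seen.contains (pvFld0 a, txt) = true :=
            (PySem.Set.contains_iff _ _).2 ((hrel _ _).2 h2)
          simp only [hc, if_true, h2, if_pos]
          exact ih facts seen apps flag hrel
        · have hc : ¬ seen.contains (pvFld0 a, txt) = true := by
            intro hc; exact h2 ((hrel _ _).1 ((PySem.Set.contains_iff _ _).1 hc))
          simp only [hc, if_neg, not_false_iff, h2]
          exact ih (facts ++ [[pvFld0 a, txt]]) (seen.add (pvFld0 a, txt))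
            (apps ++ [pvFld0 a]) true (relSF_add seen facts _ _ hrel h2)
      · simp only [beq_iff_eq, h1, if_neg, not_false_iff]
        exact ih facts seen apps flag hrel
  intro facts seen apps flag hrel
  have := key factDb facts seen apps flag hrel
  simpa only [altTxt, buildIndex_getD] using this

theorem altLoop_align (factDb : List (List String)) :
    ∀ (fuel : Nat) (facts : List (List String)) (seen : PySem.Set (String × String))
      (s pending : List String) (flag : Bool), RelSF seen facts →
    altLoop (buildIndex factDb) fuel seen facts pending =
      (checkPass factDb fuel facts s pending flag).1 := by
  intro fuel
  induction fuel with
  | zero => intro facts seen s pending flag _; rfl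
  | succ fuel ih =>
    intro facts seen s pending flag hrel
    match pending with
    | [] => rfl
    | txt :: rest =>
      obtain ⟨hfa, hap, hrel'⟩ := altTxt_corr factDb txt facts seen [] flag hrel
      simp only [altLoop, checkPass, hfa, hap]
      exact ih _ _ _ _ _ (hfa ▸ hrel')

theorem checkPass_sat (factDb : List (List String)) :
    ∀ (fuel : Nat) (facts : List (List String)) (s pending : List String) (flag : Bool),
    facts.Nodup → (∀ x ∈ facts, ∃ a ∈ factDb, x = dbPair a) →
    (∀ t ∈ s, t ∈ pending ∨ SatTxt factDb facts t) →
    pending.length + ((factDb.map dbPair).dedup.length - facts.length) < fuel →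
    ∀ t ∈ (checkPass factDb fuel facts s pending flag).2.1,
      SatTxt factDb (checkPass factDb fuel facts s pending flag).1 t := by
  intro fuel
  induction fuel with
  | zero => intro facts s pending flag _ _ _ hlt; omega
  | succ fuel ih =>
    intro facts s pending flag hnd hmem hdone hlt
    match pending with
    | [] =>
      intro t ht
      rcases hdone t ht with h | h
      · exact absurd h (List.not_mem_nil)
      · exact h
    | txt :: rest =>
      obtain ⟨X, hX⟩ := checkTxt_shape factDb txt facts [] flag
      obtain ⟨hnd', hmem'⟩ := checkTxt_inv factDb txt facts [] flag hnd
      obtain ⟨hsat', hmono⟩ := checkTxt_sat factDb txt facts [] flag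
      rw [hX] at hnd' hmem' hsat' hmono
      simp only [checkPass, hX, List.nil_append]
      have hmem'' : ∀ x ∈ facts ++ X.map (fun p => [p, txt]), ∃ a ∈ factDb, x = dbPair a := by
        intro x hx
        rcases hmem' x hx with h | h
        · exact hmem x h
        · exact h
      have hlen : (facts ++ X.map (fun p => [p, txt])).length ≤
          (factDb.map dbPair).dedup.length := by
        have hsub : facts ++ X.map (fun p => [p, txt]) ⊆ (factDb.map dbPair).dedup := by
          intro x hx
          obtain ⟨a, ha, he⟩ := hmem'' x hx
          exact List.mem_dedup.2 (List.mem_map.2 ⟨a, ha, he.symm⟩)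
        exact (List.Nodup.subperm hnd' hsub).length_le
      apply ih (facts ++ X.map (fun p => [p, txt])) (s ++ X) (rest ++ X) _ hnd' hmem''
      · intro t ht
        rcases List.mem_append.1 ht with h | h
        · rcases hdone t h with h' | h'
          · rcases List.mem_cons.1 h' with rfl | h''
            · exact Or.inr hsat'
            · exact Or.inl (List.mem_append_left _ h'')
          · exact Or.inr (fun a ha hat => hmono _ (h' a ha hat))
        · exact Or.inl (List.mem_append_right _ h)
      · simp only [List.length_append, List.length_map] at hlen ⊢
        simp only [List.length_cons] at hlt
        omega

theorem checkPass_noop (factDb : List (List String)) :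
    ∀ (fuel : Nat) (facts : List (List String)) (s pending : List String) (flag : Bool),
    (∀ t ∈ pending, SatTxt factDb facts t) → pending.length < fuel →
    checkPass factDb fuel facts s pending flag = (facts, s, flag) := by
  intro fuel
  induction fuel with
  | zero => intro facts s pending flag _ hlt; omega
  | succ fuel ih =>
    intro facts s pending flag hsat hlt
    match pending with
    | [] => rfl
    | txt :: rest =>
      have hno := checkTxt_noop factDb txt facts [] flag (hsat txt List.mem_cons_self)
      simp only [checkPass, hno, List.append_nil]
      exact ih facts s rest flag (fun t ht => hsat t (List.mem_cons_of_mem _ ht))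
        (by simp only [List.length_cons] at hlt; omega)

-- ===== VERDICT (by name: the statement is the Claim_ definition above) =====
theorem check_spec : Claim_equal_check := by
  intro str factDb _ _
  unfold Spec_check check check_alt
  have hD : (factDb.map dbPair).dedup.length ≤ factDb.length := by
    have := (factDb.map dbPair).dedup_sublist.length_le
    simpa using this
  have hfuel : str.length + ((factDb.map dbPair).dedup.length - ([] : List (List String)).length)
      < str.length + factDb.length + 1 := by simp; omega
  have hsat := checkPass_sat factDb (str.length + factDb.length + 1) [] str str false
    List.nodup_nil (by simp) (fun t ht => Or.inl ht) hfuel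
  have halt : altLoop (buildIndex factDb) (str.length + factDb.length + 1)
      PySem.Set.empty [] str =
      (checkPass factDb (str.length + factDb.length + 1) [] str str false).1 :=
    altLoop_align factDb _ [] PySem.Set.empty str str false
      (by intro p t; simp [PySem.Set.empty])
  rw [halt]
  have h2 : factDb.length + 2 = (factDb.length + 1) + 1 := rfl
  rw [h2, checkWhile]
  cases hflag : (checkPass factDb (str.length + factDb.length + 1) [] str str false).2.2
  · simp only [hflag, if_neg, Bool.false_eq_true, not_false_iff]
  · simp only [hflag, if_pos]
    rw [checkWhile]
    rw [checkPass_noop factDb _ _ _ _ false hsat (by omega)]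
    rfl
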